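-- pv_equiv track=rewrite | github.com/AnWang-AI/AugABSA | scripts/data2text/data_utils.py | compare_quads_or_pairs_with_pairs
-- ===== SOURCE A (Python) =====
-- def compare_quads_or_pairs_with_pairs(quads_or_pairs, pairs):
--     pairs1 = []
--     if len(quads_or_pairs) != 0:
--         if len(quads_or_pairs[0]) == 4:
--             new_quads = []
--             for q in quads_or_pairs:
--                 new_quads.append(q)
--             quads = new_quads
--             pairs1 = [q[1:3] for q in quads]
--         else:
--             new_pairs = []
--             for p in quads_or_pairs:
--                 if len(p) == 2:
--                     new_pairs.append(p)
--             pairs1 = new_pairs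
--
--     count = 0
--     accessed = []
--     less_pred = False
--     more_pred = False
--     for p1 in pairs1:
--         if p1 not in accessed:
--             accessed.append(p1)
--             if p1 in pairs:
--                 count += 1
--         else:
--             continue
--     for p2 in pairs:
--         if p2 not in accessed:
--             more_pred = True
--     if count < len(accessed):
--         less_pred = True
--
--     if not more_pred and not less_pred:
--         return 0  # correct
--     elif more_pred and not less_pred:
--         return 1  # more
--     elif less_pred and not more_pred:
--         return 2  # less
--     if more_pred and less_pred:
--         return 3  # more and less
-- ===== SOURCE B (Python) =====
-- def compare_quads_or_pairs_with_pairs(quads_or_pairs, pairs):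
--     if quads_or_pairs and len(quads_or_pairs[0]) == 4:
--         pred = [tuple(q[1:3]) for q in quads_or_pairs]
--     else:
--         pred = [tuple(p) for p in quads_or_pairs if len(p) == 2]
--     # one tag dictionary: bit 1 = predicted, bit 2 = gold
--     tag = {}
--     for t in pred:
--         tag[t] = 1
--     for g in pairs:
--         t = tuple(g)
--         tag[t] = tag.get(t, 0) | 2
--     more = 2 in tag.values()   # a gold-only key exists
--     less = 1 in tag.values()   # a predicted-only key exists
--     return (1 if more else 0) + (2 if less else 0)
-- ===== Notes on version B (the rewrite author's own statement) =====
-- stated objective: alternative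
-- what changed: Replaces A's dedup accumulator, the two membership loops, the count-vs-length test and the 4-way branch chain by one tag dictionary (bit 1 = predicted, bit 2 = gold) built in two passes, reading the verdict off which tag values occur.
import Mathlib
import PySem

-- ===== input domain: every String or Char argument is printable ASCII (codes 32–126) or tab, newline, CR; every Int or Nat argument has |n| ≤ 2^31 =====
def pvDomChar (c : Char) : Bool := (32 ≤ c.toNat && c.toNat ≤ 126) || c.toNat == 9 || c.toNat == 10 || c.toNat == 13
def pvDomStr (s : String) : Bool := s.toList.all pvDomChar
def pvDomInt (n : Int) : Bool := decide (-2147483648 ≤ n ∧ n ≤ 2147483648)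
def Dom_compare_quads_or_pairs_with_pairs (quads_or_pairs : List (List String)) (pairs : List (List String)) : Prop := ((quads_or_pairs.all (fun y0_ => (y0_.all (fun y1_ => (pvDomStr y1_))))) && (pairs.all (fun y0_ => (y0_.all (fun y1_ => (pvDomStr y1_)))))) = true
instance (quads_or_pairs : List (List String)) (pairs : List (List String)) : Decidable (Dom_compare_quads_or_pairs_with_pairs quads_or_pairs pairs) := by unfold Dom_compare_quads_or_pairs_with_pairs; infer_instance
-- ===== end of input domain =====

-- B replaces A's dedup accumulator, the two quadratic membership loops and the 4-way
-- branch chain by ONE tag dictionary (bit 1 = predicted, bit 2 = gold) built in two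
-- passes, then reads the verdict off which tag values occur (objective: alternative).

-- ===== PORT A =====
def compare_quads_or_pairs_with_pairs (quads_or_pairs : List (List String)) (pairs : List (List String)) : Int :=
  let pairs1 : List (List String) :=
    match quads_or_pairs with
    | [] => []
    | q0 :: _ =>
      if q0.length = 4 then
        (quads_or_pairs.foldl (fun acc q => acc ++ [q]) []).map (fun q => PySem.List.slice q (some 1) (some 3))
      else
        quads_or_pairs.foldl (fun acc p => if p.length == 2 then acc ++ [p] else acc) []
  let st := pairs1.foldl
      (fun (st : Int × List (List String)) p1 =>
        if p1 ∈ st.2 then st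
        else (st.1 + (if p1 ∈ pairs then 1 else 0), st.2 ++ [p1]))
      (0, [])
  let more_pred := pairs.foldl (fun m p2 => if p2 ∈ st.2 then m else true) false
  let less_pred : Bool := decide (st.1 < (st.2.length : Int))
  if !more_pred && !less_pred then 0
  else if more_pred && !less_pred then 1
  else if less_pred && !more_pred then 2
  else 3

-- ===== PORT B =====
def compare_quads_or_pairs_with_pairs_alt (quads_or_pairs : List (List String)) (pairs : List (List String)) : Int :=
  let pred : List (List String) :=
    match quads_or_pairs with
    | q0 :: _ =>
      if q0.length = 4 then
        quads_or_pairs.map (fun q => PySem.List.slice q (some 1) (some 3))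
      else
        quads_or_pairs.filter (fun p => p.length == 2)
    | [] => List.filter (fun p => p.length == 2) quads_or_pairs
  let tag0 : PySem.Dict (List String) Int :=
    pred.foldl (fun d t => d.insert t 1) PySem.Dict.empty
  let tag : PySem.Dict (List String) Int :=
    pairs.foldl (fun d g => d.insert g (PySem.Int.bor (d.getD g 0) 2)) tag0
  let more : Bool := tag.values.contains 2
  let less : Bool := tag.values.contains 1
  (if more then 1 else 0) + (if less then 2 else 0)

-- ===== PRECONDITION & SPEC =====
def Spec_compare_quads_or_pairs_with_pairs (quads_or_pairs : List (List String)) (pairs : List (List String)) (out : Int) : Prop := out = compare_quads_or_pairs_with_pairs_alt quads_or_pairs pairs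
instance (quads_or_pairs : List (List String)) (pairs : List (List String)) (out : Int) : Decidable (Spec_compare_quads_or_pairs_with_pairs quads_or_pairs pairs out) := by unfold Spec_compare_quads_or_pairs_with_pairs; infer_instance

-- ===== CLAIM (what is proved, stated in full; the proofs are below) =====
def Claim_equal_compare_quads_or_pairs_with_pairs : Prop := ∀ (quads_or_pairs : List (List String)) (pairs : List (List String)), Dom_compare_quads_or_pairs_with_pairs quads_or_pairs pairs → Spec_compare_quads_or_pairs_with_pairs quads_or_pairs pairs (compare_quads_or_pairs_with_pairs quads_or_pairs pairs)

-- ===== LEMMAS AND PROOFS =====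

-- the common reference value both cores are reduced to:
-- 1 iff some gold pair is missing from the predictions, plus 2 iff some prediction is not gold
def pvRef (L ps : List (List String)) : Int :=
  (if ps.any (fun g => !decide (g ∈ L)) then 1 else 0)
  + (if L.any (fun p => !decide (p ∈ ps)) then 2 else 0)

-- ---- A side ----

-- A's dedup-and-count loop: accessed is Set-construction over pairs1, count is the
-- number of accessed elements that occur in pairs.
lemma pvFoldSpec (ps : List (List String)) :
    ∀ (L acc : List (List String)),
    List.foldl (fun (st : Int × List (List String)) p1 =>
        if p1 ∈ st.2 then st
        else (st.1 + (if p1 ∈ ps then 1 else 0), st.2 ++ [p1]))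
      ((((acc.filter (fun x => decide (x ∈ ps))).length : Nat) : Int), acc) L
    = ((((L.foldl PySem.Set.add acc).filter (fun x => decide (x ∈ ps))).length : Int),
       L.foldl PySem.Set.add acc)
  | [], acc => by simp
  | x :: L, acc => by
    by_cases hx : x ∈ acc
    · have hadd : PySem.Set.add acc x = acc := by
        simp [PySem.Set.add, PySem.Set.contains, hx]
      simp only [List.foldl_cons, if_pos hx, hadd]
      exact pvFoldSpec ps L acc
    · have hadd : PySem.Set.add acc x = acc ++ [x] := by
        simp [PySem.Set.add, PySem.Set.contains, hx]
      have hlen : (((acc ++ [x]).filter (fun x => decide (x ∈ ps))).length : Int)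
          = ((acc.filter (fun x => decide (x ∈ ps))).length : Int) + (if x ∈ ps then 1 else 0) := by
        rw [List.filter_append]
        by_cases hp : x ∈ ps <;> simp [hp]
      simp only [List.foldl_cons, if_neg hx, hadd]
      rw [← pvFoldSpec ps L (acc ++ [x]), hlen]

-- A's second loop is "some gold pair missing from accessed".
lemma pvMoreFold (S : List (List String)) :
    ∀ (ps : List (List String)) (b : Bool),
    List.foldl (fun m p2 => if p2 ∈ S then m else true) b ps
    = (b || ps.any (fun p2 => !decide (p2 ∈ S)))
  | [], b => by simp
  | p :: ps, b => by
    rw [List.foldl_cons, pvMoreFold S ps]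
    by_cases hp : p ∈ S <;> simp [hp]

lemma pvCoreA (L ps : List (List String)) :
    (let st := List.foldl (fun (st : Int × List (List String)) p1 =>
        if p1 ∈ st.2 then st
        else (st.1 + (if p1 ∈ ps then 1 else 0), st.2 ++ [p1])) (0, ([] : List (List String))) L
     let more_pred := List.foldl (fun m p2 => if p2 ∈ st.2 then m else true) false ps
     let less_pred : Bool := decide (st.1 < (st.2.length : Int))
     if !more_pred && !less_pred then (0 : Int)
     else if more_pred && !less_pred then 1
     else if less_pred && !more_pred then 2
     else 3)
    = pvRef L ps := by
  have h0 : ((0 : Int), ([] : List (List String)))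
      = (((([] : List (List String)).filter (fun x => decide (x ∈ ps))).length : Int), ([] : List (List String))) := by
    simp
  rw [h0, pvFoldSpec ps L []]
  have hS : List.foldl PySem.Set.add [] L = PySem.Set.ofList L := rfl
  rw [hS]
  set S := PySem.Set.ofList L with hSdef
  have hmore : (List.foldl (fun m p2 => if p2 ∈ S then m else true) false ps)
      = ps.any (fun g => !decide (g ∈ L)) := by
    rw [pvMoreFold S ps false]
    simp [hSdef, PySem.Set.mem_ofList]
  have hlt : ((S.filter (fun x => decide (x ∈ ps))).length < S.length)
      ↔ ∃ x ∈ L, x ∉ ps := by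
    have hle := List.length_filter_le (fun x => decide (x ∈ ps)) S
    constructor
    · intro h
      by_contra hc
      push Not at hc
      have heq : (S.filter (fun x => decide (x ∈ ps))).length = S.length := by
        rw [List.length_filter_eq_length_iff]
        intro a ha
        exact decide_eq_true (hc a ((PySem.Set.mem_ofList L a).mp ha))
      omega
    · rintro ⟨x, hx, hxp⟩
      have hxS : x ∈ S := (PySem.Set.mem_ofList L x).mpr hx
      rcases Nat.lt_or_ge ((S.filter (fun x => decide (x ∈ ps))).length) S.length with h | h
      · exact h
      · have heq : (S.filter (fun x => decide (x ∈ ps))).length = S.length :=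
          le_antisymm hle h
        rw [List.length_filter_eq_length_iff] at heq
        exact absurd (by simpa using heq x hxS) hxp
  have hless : (decide ((((S.filter (fun x => decide (x ∈ ps))).length : Nat) : Int) < (S.length : Int)))
      = L.any (fun p => !decide (p ∈ ps)) := by
    rw [Bool.eq_iff_iff]
    simp only [decide_eq_true_eq, Int.ofNat_lt]
    rw [hlt, List.any_eq_true]
    simp
  dsimp only
  rw [hmore, hless, pvRef]
  cases h1 : ps.any (fun g => !decide (g ∈ L)) <;>
    cases h2 : L.any (fun p => !decide (p ∈ ps)) <;> simp

-- the list pairs1 that A builds equals the base list B feeds into its tag dictionary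
lemma pvPairs1Map (qs : List (List String)) :
    (qs.foldl (fun acc q => acc ++ [q]) []).map (fun q => PySem.List.slice q (some 1) (some 3))
    = qs.map (fun q => PySem.List.slice q (some 1) (some 3)) := by
  rw [PySem.List.foldl_append_singleton]
  simp

lemma pvPairs1Filter (qs : List (List String)) :
    qs.foldl (fun acc p => if p.length == 2 then acc ++ [p] else acc) []
    = qs.filter (fun p => p.length == 2) := by
  have := PySem.List.foldl_append_if (fun p : List String => p.length == 2) id qs []
  simpa using this

-- ---- B side ----

-- first tag pass: every predicted pair is tagged 1, everything else keeps its value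
lemma pvTag0GetD (L : List (List String)) :
    ∀ (d : PySem.Dict (List String) Int) (k : List String),
    (L.foldl (fun d t => d.insert t 1) d).getD k 0
    = if k ∈ L then 1 else d.getD k 0
  | d, k => by
    induction L generalizing d with
    | nil => simp
    | cons t L ih =>
      rw [List.foldl_cons, ih]
      by_cases hk : k ∈ L
      · simp [hk]
      · by_cases he : k = t <;>
          simp [hk, he, PySem.Dict.getD_insert]

-- or-ing 2 into a small tag value is idempotent
lemma pvBor2 (v : Int) (hv : v = 0 ∨ v = 1 ∨ v = 2 ∨ v = 3) :
    PySem.Int.bor (PySem.Int.bor v 2) 2 = PySem.Int.bor v 2 := by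
  rcases hv with h | h | h | h <;> subst h <;> decide

-- second tag pass: every gold pair gets bit 2 or-ed in, once
lemma pvTagGetD (ps : List (List String)) :
    ∀ (d : PySem.Dict (List String) Int),
    (∀ j, d.getD j 0 = 0 ∨ d.getD j 0 = 1 ∨ d.getD j 0 = 2 ∨ d.getD j 0 = 3) →
    ∀ (k : List String),
    (ps.foldl (fun d g => d.insert g (PySem.Int.bor (d.getD g 0) 2)) d).getD k 0
    = if k ∈ ps then PySem.Int.bor (d.getD k 0) 2 else d.getD k 0 := by
  induction ps with
  | nil => intro d _ k; simp
  | cons g ps ih =>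
    intro d hd k
    rw [List.foldl_cons]
    have hd' : ∀ j, (d.insert g (PySem.Int.bor (d.getD g 0) 2)).getD j 0 = 0 ∨
        (d.insert g (PySem.Int.bor (d.getD g 0) 2)).getD j 0 = 1 ∨
        (d.insert g (PySem.Int.bor (d.getD g 0) 2)).getD j 0 = 2 ∨
        (d.insert g (PySem.Int.bor (d.getD g 0) 2)).getD j 0 = 3 := by
      intro j
      rw [PySem.Dict.getD_insert]
      by_cases hj : j = g
      · rw [if_pos hj]
        rcases hd g with h | h | h | h <;> rw [h] <;> decide
      · rw [if_neg hj]; exact hd j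
    rw [ih _ hd' k]
    by_cases hk : k ∈ ps
    · rw [if_pos hk, if_pos (List.mem_cons_of_mem g hk), PySem.Dict.getD_insert]
      by_cases he : k = g
      · rw [if_pos he, he]
        exact pvBor2 _ (hd g)
      · rw [if_neg he]
    · rw [if_neg hk, PySem.Dict.getD_insert]
      by_cases he : k = g
      · rw [if_pos he, he, if_pos (List.mem_cons_self)]
      · rw [if_neg he, if_neg (by simp [he, hk])]

-- the tag dictionary's keys are exactly the predicted and gold pairs
lemma pvTagKeys (L ps : List (List String)) (k : List String) :
    k ∈ (ps.foldl (fun d g => d.insert g (PySem.Int.bor (d.getD g 0) 2))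
          (L.foldl (fun d t => d.insert t 1) (PySem.Dict.empty))).keys
    ↔ k ∈ L ∨ k ∈ ps := by
  rw [PySem.Dict.keys_foldl_insert, PySem.Dict.keys_foldl_insert]
  rw [PySem.Set.mem_update, PySem.Set.mem_update]
  simp [PySem.Dict.keys_empty]

lemma pvTagNodup (L ps : List (List String)) :
    (ps.foldl (fun d g => d.insert g (PySem.Int.bor (d.getD g 0) 2))
        (L.foldl (fun d t => d.insert t 1) (PySem.Dict.empty))).keys.Nodup := by
  apply PySem.Dict.nodup_keys_foldl_insert
  apply PySem.Dict.nodup_keys_foldl_insert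
  exact PySem.Dict.nodup_keys_empty

-- the final value of any key in the tag dictionary, in closed form
lemma pvTagValue (L ps : List (List String)) (k : List String) :
    (ps.foldl (fun d g => d.insert g (PySem.Int.bor (d.getD g 0) 2))
        (L.foldl (fun d t => d.insert t 1) (PySem.Dict.empty))).getD k 0
    = if k ∈ ps then (if k ∈ L then 3 else 2) else (if k ∈ L then 1 else 0) := by
  have h0 : ∀ j, (L.foldl (fun d t => d.insert t 1) (PySem.Dict.empty (κ := List String) (ν := Int))).getD j 0 = 0 ∨
      (L.foldl (fun d t => d.insert t 1) (PySem.Dict.empty (κ := List String) (ν := Int))).getD j 0 = 1 ∨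
      (L.foldl (fun d t => d.insert t 1) (PySem.Dict.empty (κ := List String) (ν := Int))).getD j 0 = 2 ∨
      (L.foldl (fun d t => d.insert t 1) (PySem.Dict.empty (κ := List String) (ν := Int))).getD j 0 = 3 := by
    intro j
    rw [pvTag0GetD L _ j]
    by_cases hj : j ∈ L <;> simp [hj]
  rw [pvTagGetD ps _ h0 k, pvTag0GetD L _ k]
  by_cases hp : k ∈ ps <;> by_cases hl : k ∈ L <;> simp [hp, hl] <;> decide

-- a value v occurs among the tag's values iff some key carries it
lemma pvValueMem (L ps : List (List String)) (v : Int) :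
    ((ps.foldl (fun d g => d.insert g (PySem.Int.bor (d.getD g 0) 2))
        (L.foldl (fun d t => d.insert t 1) (PySem.Dict.empty))).values.contains v = true)
    ↔ ∃ k, (k ∈ L ∨ k ∈ ps) ∧
        (if k ∈ ps then (if k ∈ L then (3:Int) else 2) else (if k ∈ L then 1 else 0)) = v := by
  rw [List.contains_iff_mem,
    PySem.Dict.values_eq_map_keys _ (pvTagNodup L ps) 0, List.mem_map]
  constructor
  · rintro ⟨k, hk, hv⟩
    exact ⟨k, (pvTagKeys L ps k).mp hk, by rw [← pvTagValue L ps k]; exact hv⟩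
  · rintro ⟨k, hk, hv⟩
    exact ⟨k, (pvTagKeys L ps k).mpr hk, by rw [pvTagValue L ps k]; exact hv⟩

lemma pvCoreB (L ps : List (List String)) :
    (let tag := ps.foldl (fun d g => d.insert g (PySem.Int.bor (d.getD g 0) 2))
        (L.foldl (fun d t => d.insert t 1) (PySem.Dict.empty))
     let more : Bool := tag.values.contains 2
     let less : Bool := tag.values.contains 1
     (if more then (1:Int) else 0) + (if less then 2 else 0))
    = pvRef L ps := by
  have hmore : ((ps.foldl (fun d g => d.insert g (PySem.Int.bor (d.getD g 0) 2))
        (L.foldl (fun d t => d.insert t 1) (PySem.Dict.empty))).values.contains (2:Int))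
      = ps.any (fun g => !decide (g ∈ L)) := by
    rw [Bool.eq_iff_iff, pvValueMem, List.any_eq_true]
    constructor
    · rintro ⟨k, _, hv⟩
      by_cases hp : k ∈ ps
      · by_cases hl : k ∈ L
        · simp [hp, hl] at hv
        · exact ⟨k, hp, by simp [hl]⟩
      · by_cases hl : k ∈ L <;> simp [hp, hl] at hv
    · rintro ⟨g, hg, hgl⟩
      simp only [Bool.not_eq_eq_eq_not, Bool.not_true, decide_eq_false_iff_not] at hgl
      exact ⟨g, Or.inr hg, by simp [hg, hgl]⟩
  have hless : ((ps.foldl (fun d g => d.insert g (PySem.Int.bor (d.getD g 0) 2))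
        (L.foldl (fun d t => d.insert t 1) (PySem.Dict.empty))).values.contains (1:Int))
      = L.any (fun p => !decide (p ∈ ps)) := by
    rw [Bool.eq_iff_iff, pvValueMem, List.any_eq_true]
    constructor
    · rintro ⟨k, _, hv⟩
      by_cases hp : k ∈ ps
      · by_cases hl : k ∈ L <;> simp [hp, hl] at hv
      · by_cases hl : k ∈ L
        · exact ⟨k, hl, by simp [hp]⟩
        · simp [hp, hl] at hv
    · rintro ⟨p, hp, hps⟩
      simp only [Bool.not_eq_eq_eq_not, Bool.not_true, decide_eq_false_iff_not] at hps
      exact ⟨p, Or.inl hp, by simp [hp, hps]⟩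
  dsimp only
  rw [hmore, hless, pvRef]

-- ===== VERDICT (by name: the statement is the Claim_ definition above) =====
theorem compare_quads_or_pairs_with_pairs_spec : Claim_equal_compare_quads_or_pairs_with_pairs := by
  unfold Claim_equal_compare_quads_or_pairs_with_pairs
  intro qs ps _
  unfold Spec_compare_quads_or_pairs_with_pairs
  unfold compare_quads_or_pairs_with_pairs compare_quads_or_pairs_with_pairs_alt
  match qs with
  | [] =>
    have hA := pvCoreA [] ps
    have hB := pvCoreB [] ps
    simpa using hA.trans hB.symm
  | q0 :: rest =>
    by_cases h4 : q0.length = 4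
    · simp only [if_pos h4]
      rw [pvPairs1Map]
      exact (pvCoreA ((q0 :: rest).map (fun q => PySem.List.slice q (some 1) (some 3))) ps).trans
        (pvCoreB ((q0 :: rest).map (fun q => PySem.List.slice q (some 1) (some 3))) ps).symm
    · simp only [if_neg h4]
      rw [pvPairs1Filter]
      exact (pvCoreA ((q0 :: rest).filter (fun p => p.length == 2)) ps).trans
        (pvCoreB ((q0 :: rest).filter (fun p => p.length == 2)) ps).symm
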